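-- pv_equiv track=rewrite | github.com/ROMANVIKI/codeforces | round1037/noCasino.py | noCasinoMountains
-- ===== SOURCE A (Python) =====
-- def noCasinoMountains(a, n, k):
--     ind = 0
--     count = 0
--     # as we slicing the indexes in the next line we need
--     while ind <= n - k:
--         if all(x == 0 for x in a[ind : ind + k]):
--             count += 1
--             ind += k + 1
--         else:
--             ind += 1
--
--     return count
-- ===== SOURCE B (Python) =====
-- def noCasinoMountains(a, n, k):
--     # precompute for each position the next nonzero index, then
--     # jump past the blocking nonzero instead of re-scanning each window.
--     m = len(a)
--     nxt = [None] * (m + 1)          # nxt[i] = least j >= i with a[j] != 0, else None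
--     for i in range(m - 1, -1, -1):
--         nxt[i] = i if a[i] != 0 else nxt[i + 1]
--     count = 0
--     ind = 0
--     while ind <= n - k:
--         p = nxt[ind] if 0 <= ind < m else None
--         if p is None or p >= ind + k:
--             count += 1
--             ind += k + 1
--         else:
--             ind = p + 1
--     return count
-- ===== Notes on version B (the rewrite author's own statement) =====
-- stated objective: alternative
-- what changed: B precomputes a next-nonzero-index table once and decides each window in O(1), jumping straight past the blocking nonzero element, instead of A's rescanning every k-element slice and advancing by one on failure (intended as faster, O(n*k) vs O(n+len(a)); a timing run confirmed it only on some input families, so no speed is claimed).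
import Mathlib
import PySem

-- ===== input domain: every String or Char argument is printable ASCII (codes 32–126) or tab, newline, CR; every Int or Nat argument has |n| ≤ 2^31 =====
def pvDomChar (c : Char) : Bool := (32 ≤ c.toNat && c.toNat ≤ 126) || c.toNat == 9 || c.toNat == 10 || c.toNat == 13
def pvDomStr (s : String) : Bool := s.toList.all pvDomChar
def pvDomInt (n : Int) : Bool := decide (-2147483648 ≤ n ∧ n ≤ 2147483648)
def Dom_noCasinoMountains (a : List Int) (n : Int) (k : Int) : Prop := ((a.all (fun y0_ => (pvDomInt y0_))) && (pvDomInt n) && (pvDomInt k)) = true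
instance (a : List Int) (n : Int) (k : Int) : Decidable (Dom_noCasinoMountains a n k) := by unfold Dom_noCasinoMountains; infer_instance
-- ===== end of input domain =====

-- B replaces A's per-window rescan by a precomputed next-nonzero table, deciding each
-- window in one lookup and jumping past the blocking nonzero element; same advance rule.

-- ===== PORT A =====
-- all(x == 0 for x in xs)
def pvAllZero (xs : List Int) : Bool := xs.all (fun x => x == 0)

-- the while loop of A; fuel (n-k+1).toNat is enough under Pre_ (ind grows by ≥ 1 each pass)
def pvLoopA (a : List Int) (n k : Int) : Int → Int → Nat → Int
  | _, count, 0 => count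
  | ind, count, fuel+1 =>
    if ind ≤ n - k then
      if pvAllZero (PySem.List.slice a (some ind) (some (ind + k))) then
        pvLoopA a n k (ind + k + 1) (count + 1) fuel
      else
        pvLoopA a n k (ind + 1) count fuel
    else count

def noCasinoMountains (a : List Int) (n : Int) (k : Int) : Int :=
  pvLoopA a n k 0 0 (n - k + 1).toNat

-- ===== PORT B =====
-- the backward fill `for i in range(m-1,-1,-1): nxt[i] = i if a[i] != 0 else nxt[i+1]`:
-- nxt[i] depends only on a[i] and nxt[i+1], so it is this right-to-left recursion
def pvBuildNxt (i : Int) : List Int → List (Option Int)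
  | [] => [none]
  | x :: xs =>
    let rest := pvBuildNxt (i + 1) xs
    (if x ≠ 0 then some i else rest.headD none) :: rest

-- the while loop of B; same fuel bound (ind grows by ≥ 1 each pass under Pre_)
def pvLoopB (a : List Int) (nxt : List (Option Int)) (n k : Int) : Int → Int → Nat → Int
  | _, count, 0 => count
  | ind, count, fuel+1 =>
    if ind ≤ n - k then
      -- p = nxt[ind] if 0 <= ind < m else None
      let p : Option Int :=
        if 0 ≤ ind ∧ ind < (a.length : Int) then (PySem.List.pyGet? nxt ind).getD none
        else none
      match p with
      | none => pvLoopB a nxt n k (ind + k + 1) (count + 1) fuel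
      | some q =>
        if ind + k ≤ q then pvLoopB a nxt n k (ind + k + 1) (count + 1) fuel
        else pvLoopB a nxt n k (q + 1) count fuel
    else count

def noCasinoMountains_alt (a : List Int) (n : Int) (k : Int) : Int :=
  pvLoopB a (pvBuildNxt 0 a) n k 0 0 (n - k + 1).toNat

-- ===== PRECONDITION & SPEC =====
-- Pre_ excludes only k < 0 with k ≤ n, where A's while loop never terminates
-- (the empty slice counts as all-zero and ind += k+1 does not increase ind).
def Pre_noCasinoMountains (a : List Int) (n : Int) (k : Int) : Prop := 0 ≤ k ∨ n < k
instance (a : List Int) (n : Int) (k : Int) : Decidable (Pre_noCasinoMountains a n k) := by unfold Pre_noCasinoMountains; infer_instance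

def pvWitness_noCasinoMountains : List Int × Int × Int := ([0, 0, 1, 0, 0], 5, 2)

def Spec_noCasinoMountains (a : List Int) (n : Int) (k : Int) (out : Int) : Prop := out = noCasinoMountains_alt a n k
instance (a : List Int) (n : Int) (k : Int) (out : Int) : Decidable (Spec_noCasinoMountains a n k out) := by unfold Spec_noCasinoMountains; infer_instance

-- ===== CLAIM (what is proved, stated in full; the proofs are below) =====
def Claim_equal_noCasinoMountains : Prop := ∀ (a : List Int) (n : Int) (k : Int), Dom_noCasinoMountains a n k → Pre_noCasinoMountains a n k → Spec_noCasinoMountains a n k (noCasinoMountains a n k)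

-- ===== LEMMAS AND PROOFS =====

-- first index ≥ s (as a label) of a nonzero entry: the mathematical content of pvBuildNxt
def pvFirstNZ (s : Int) : List Int → Option Int
  | [] => none
  | x :: xs => if x ≠ 0 then some s else pvFirstNZ (s + 1) xs

theorem pvBuildNxt_length (s : Int) (a : List Int) : (pvBuildNxt s a).length = a.length + 1 := by
  induction a generalizing s with
  | nil => rfl
  | cons x xs ih => simp [pvBuildNxt, ih]

theorem pvBuildNxt_getD (a : List Int) (s : Int) (j : Nat) :
    (pvBuildNxt s a).getD j none = pvFirstNZ (s + j) (a.drop j) := by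
  induction a generalizing s j with
  | nil => cases j <;> simp [pvBuildNxt, pvFirstNZ]
  | cons x xs ih =>
    cases j with
    | zero =>
      simp only [pvBuildNxt, pvFirstNZ, List.drop_zero, Nat.cast_zero, add_zero]
      by_cases hx : x ≠ 0
      · simp [hx]
      · have h0 := ih (s + 1) 0
        simp only [Nat.cast_zero, add_zero, List.drop_zero] at h0
        rw [← h0]
        cases pvBuildNxt (s + 1) xs <;> simp [hx, List.getD]
    | succ j' =>
      simp only [pvBuildNxt, List.getD_cons_succ, List.drop_succ_cons]
      rw [ih (s + 1) j']
      congr 1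
      push_cast
      ring

theorem pvFirstNZ_bounds (l : List Int) (s u : Int) (h : pvFirstNZ s l = some u) :
    s ≤ u ∧ u < s + l.length := by
  induction l generalizing s with
  | nil => simp [pvFirstNZ] at h
  | cons x xs ih =>
    simp only [pvFirstNZ] at h
    split at h
    · cases h; simp only [List.length_cons]; push_cast; omega
    · have := ih (s + 1) h
      simp only [List.length_cons]
      push_cast
      omega

theorem pvFirstNZ_head_zero (l : List Int) (s u : Int) (h : pvFirstNZ s l = some u) (hu : s < u) :
    pvFirstNZ s l = pvFirstNZ (s + 1) l.tail ∧ l ≠ [] := by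
  cases l with
  | nil => simp [pvFirstNZ] at h
  | cons x xs =>
    simp only [pvFirstNZ] at h ⊢
    split at h
    · cases h; omega
    · simp_all

-- A's window test, expressed through pvFirstNZ
theorem pvAllZero_take (l : List Int) (s : Int) (t : Nat) :
    pvAllZero (l.take t) =
      (match pvFirstNZ s l with
       | none => true
       | some u => decide (s + t ≤ u)) := by
  induction l generalizing s t with
  | nil => cases t <;> simp [pvAllZero, pvFirstNZ]
  | cons x xs ih =>
    cases t with
    | zero =>
      simp only [List.take_zero]
      cases h : pvFirstNZ s (x :: xs) with
      | none => simp [pvAllZero]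
      | some u =>
        have := pvFirstNZ_bounds _ _ _ h
        simp [pvAllZero]
        omega
    | succ t' =>
      simp only [List.take_succ_cons, pvAllZero, List.all_cons, pvFirstNZ]
      by_cases hx : x ≠ 0
      · have hx0 : (x == 0) = false := by simpa using hx
        simp only [if_pos hx, hx0, Bool.false_and]
        symm
        simp only [decide_eq_false_iff_not]
        push_cast
        omega
      · rw [not_not] at hx
        subst hx
        simp only [if_neg (by simp : ¬((0:Int) ≠ 0)), beq_self_eq_true, Bool.true_and]
        have h1 := ih (s + 1) t'
        simp only [pvAllZero] at h1
        rw [h1]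
        cases h : pvFirstNZ (s + 1) xs with
        | none => rfl
        | some u => rw [decide_eq_decide]; push_cast; omega

theorem pvLoopA_exit (a : List Int) (n k ind count : Int) (f : Nat) (h : ¬ ind ≤ n - k) :
    pvLoopA a n k ind count f = count := by
  cases f <;> simp [pvLoopA, h]

theorem pvLoopB_exit (a' : List Int) (nxt : List (Option Int)) (n k ind count : Int) (f : Nat)
    (h : ¬ ind ≤ n - k) : pvLoopB a' nxt n k ind count f = count := by
  cases f <;> simp [pvLoopB, h]

-- the value B looks up is pvFirstNZ of the suffix
theorem pvLookup_eq (a : List Int) (ind : Int) (h : 0 ≤ ind) :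
    (if 0 ≤ ind ∧ ind < (a.length : Int) then (PySem.List.pyGet? (pvBuildNxt 0 a) ind).getD none
     else none) = pvFirstNZ ind (a.drop ind.toNat) := by
  by_cases hm : ind < (a.length : Int)
  · have h1 : PySem.List.pyGet? (pvBuildNxt 0 a) ind = (pvBuildNxt 0 a)[ind.toNat]? := by
      exact PySem.List.pyGet?_of_nonneg_of_lt _ h (by rw [pvBuildNxt_length]; push_cast; omega)
    have h2 : (pvBuildNxt 0 a)[ind.toNat]? = some ((pvBuildNxt 0 a).getD ind.toNat none) := by
      rw [List.getD_eq_getElem?_getD, List.getElem?_eq_getElem (by rw [pvBuildNxt_length]; omega),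
          Option.getD_some]
    rw [if_pos ⟨h, hm⟩, h1, h2, Option.getD_some, pvBuildNxt_getD]
    congr 1
    omega
  · rw [if_neg (by tauto)]
    have : a.drop ind.toNat = [] := by
      apply List.drop_eq_nil_of_le; omega
    rw [this]; rfl

-- main equivalence of the two loops
theorem pvLoop_main (a : List Int) (n k : Int) (hk : 0 ≤ k) :
    ∀ (M : Nat) (ind count : Int) (fA fB : Nat), 0 ≤ ind →
      (n - k - ind + 1).toNat ≤ M → (n - k - ind + 1).toNat ≤ fA → (n - k - ind + 1).toNat ≤ fB →
      pvLoopA a n k ind count fA = pvLoopB a (pvBuildNxt 0 a) n k ind count fB := by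
  intro M
  induction M with
  | zero =>
    intro ind count fA fB hind hM hfA hfB
    have hgt : ¬ ind ≤ n - k := by omega
    rw [pvLoopA_exit _ _ _ _ _ _ hgt, pvLoopB_exit _ _ _ _ _ _ _ hgt]
  | succ M ih =>
    intro ind count fA fB hind hM hfA hfB
    by_cases hle : ind ≤ n - k
    · obtain ⟨fa, rfl⟩ : ∃ f, fA = f + 1 := ⟨fA - 1, by omega⟩
      obtain ⟨fb, rfl⟩ : ∃ f, fB = f + 1 := ⟨fB - 1, by omega⟩
      have hslice : PySem.List.slice a (some ind) (some (ind + k)) =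
          (a.drop ind.toNat).take ((ind + k).toNat - ind.toNat) :=
        PySem.List.slice_toNat a hind (by omega)
      have htk : (ind + k).toNat - ind.toNat = k.toNat := by omega
      have hAZ := pvAllZero_take (a.drop ind.toNat) ind k.toNat
      simp only [pvLoopA, pvLoopB, if_pos hle]
      rw [pvLookup_eq a ind hind, hslice, htk]
      cases hfz : pvFirstNZ ind (a.drop ind.toNat) with
      | none =>
        simp only [hfz] at hAZ
        rw [hAZ, if_pos rfl]
        exact ih (ind + k + 1) (count + 1) fa fb (by omega) (by omega) (by omega) (by omega)
      | some u =>
        simp only [hfz] at hAZ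
        have hbnd := pvFirstNZ_bounds _ _ _ hfz
        by_cases hq : ind + k ≤ u
        · have : pvAllZero ((a.drop ind.toNat).take k.toNat) = true := by
            rw [hAZ]; simp only [decide_eq_true_eq]; omega
          rw [this]
          simp only [if_pos hq, if_true]
          exact ih (ind + k + 1) (count + 1) fa fb (by omega) (by omega) (by omega) (by omega)
        · have hfalse : pvAllZero ((a.drop ind.toNat).take k.toNat) = false := by
            rw [hAZ]; simp only [decide_eq_false_iff_not]; omega
          rw [hfalse]
          simp only [Bool.false_eq_true, if_false, if_neg hq]
          by_cases hu0 : u = ind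
          · -- a[ind] itself is nonzero: both loops continue at ind + 1
            subst hu0
            exact ih (u + 1) count fa fb (by omega) (by omega) (by omega) (by omega)
          · -- the blocking nonzero is further right: A steps to ind+1, B jumps to u+1;
            -- B's step at ind+1 jumps to the same u+1
            have hlt : ind < u := by omega
            have hstep := pvFirstNZ_head_zero _ _ _ hfz hlt
            have htail : (a.drop ind.toNat).tail = a.drop (ind + 1).toNat := by
              rw [List.tail_drop]; congr 1; omega
            have hfz' : pvFirstNZ (ind + 1) (a.drop (ind + 1).toNat) = some u := by
              rw [← htail, ← hstep.1, hfz]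
            by_cases hle2 : ind + 1 ≤ n - k
            · have hA := ih (ind + 1) count fa (fb + 1) (by omega) (by omega) (by omega) (by omega)
              rw [hA]
              -- unfold B's one step at ind + 1: it fails and jumps to u + 1
              simp only [pvLoopB, if_pos hle2]
              rw [pvLookup_eq a (ind + 1) (by omega), hfz']
              simp only [if_neg (show ¬ ind + 1 + k ≤ u by omega)]
            · -- ind + 1 is already past the last start: A exits with count, B's jump also exits
              rw [pvLoopA_exit _ _ _ _ _ _ hle2, pvLoopB_exit _ _ _ _ _ _ _ (by omega)]
    · rw [pvLoopA_exit _ _ _ _ _ _ hle, pvLoopB_exit _ _ _ _ _ _ _ hle]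

-- ===== VERDICT (by name: the statement is the Claim_ definition above) =====
theorem noCasinoMountains_spec : Claim_equal_noCasinoMountains := by
  intro a n k _ hpre
  unfold Spec_noCasinoMountains noCasinoMountains noCasinoMountains_alt
  by_cases hk : 0 ≤ k
  · exact pvLoop_main a n k hk (n - k + 1).toNat 0 0 _ _ le_rfl (by omega) (by omega) (by omega)
  · have hn : n < k := by rcases hpre with h | h; omega; exact h
    have : (n - k + 1).toNat = 0 := by omega
    rw [this]; rfl
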